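-- pv_equiv track=rewrite | github.com/lungnahahd/Python_Prac | backjoon/2024/FastCampus/Part7/TwoDimensionArrCalculate.py | c_method
-- ===== SOURCE A (Python) =====
-- import heapq
--
-- def c_method(array):
--     max_len = len(array) * 2
--     mid_result = [[] for _ in range(max_len)]
--     #mid_result = []
--
--     cut = 0
--     for col_idx in range(len(array[0])):
--         now_col_arr = []
--         for row_idx in range(len(array)):
--             now_col_arr.append(array[row_idx][col_idx])
--         now_col_arr.sort()
--         cnt, before = 0, now_col_arr[0]
--         hq = []
--         for num in now_col_arr:
--             if num == 0:
--                 continue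
--             if num == before:
--                 cnt += 1
--             else:
--                 if before !=0 :
--                     heapq.heappush(hq, (cnt, before))
--                 cnt = 1
--                 before = num
--         heapq.heappush(hq, (cnt, before))
--         end = 0
--         while hq:
--             if len(hq) == 0:
--                 mid_result[end].append(0)
--                 mid_result[end+1].append(0)
--             else:
--                 cnt, num = heapq.heappop(hq)
--                 mid_result[end].append(num)
--                 mid_result[end+1].append(cnt)
--             end += 2
--         cut = max(cut, end)
--
--     #mid_result = mid_result[:cut]
--
--     return mid_result
-- ===== SOURCE B (Python) =====
-- def c_method(array):
--     mid_result = [[] for _ in range(len(array) * 2)]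
--     for j in range(len(array[0])):
--         counts = {}
--         for row in array:
--             v = row[j]
--             if v != 0:
--                 counts[v] = counts.get(v, 0) + 1
--         pairs = sorted((c, v) for v, c in counts.items()) or [(0, 0)]
--         for i, (c, v) in enumerate(pairs):
--             mid_result[2 * i].append(v)
--             mid_result[2 * i + 1].append(c)
--     return mid_result
-- ===== Notes on version B (the rewrite author's own statement) =====
-- stated objective: simpler
-- what changed: Replaces the per-column full sort + run-length scan + heap push/pop with a dictionary frequency count of the nonzero values and one sort of the (count, value) pairs, written positionally into the result rows.
import Mathlib
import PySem

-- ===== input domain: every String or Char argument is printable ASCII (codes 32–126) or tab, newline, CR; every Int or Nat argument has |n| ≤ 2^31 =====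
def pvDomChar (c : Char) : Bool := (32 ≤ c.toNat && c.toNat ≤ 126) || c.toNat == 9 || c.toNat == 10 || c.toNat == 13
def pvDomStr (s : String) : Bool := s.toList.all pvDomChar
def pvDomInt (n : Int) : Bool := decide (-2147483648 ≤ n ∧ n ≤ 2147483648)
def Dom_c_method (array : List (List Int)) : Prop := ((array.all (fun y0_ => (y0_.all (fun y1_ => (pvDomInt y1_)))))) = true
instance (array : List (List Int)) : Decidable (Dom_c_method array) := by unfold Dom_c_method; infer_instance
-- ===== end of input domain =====

-- B replaces A's per-column sort + run-length scan + heap with a dictionary frequency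
-- count of the nonzero values and one sort of the (count, value) pairs ('simpler').

-- ===== PORT A =====
-- heapq is modelled as a list kept in Python-tuple (lexicographic) order:
-- heappush = ordered insert, heappop = head of the ordered list — observationally
-- exact for heapq here since all pairs pushed into one heap are distinct.
def heapLt (a b : Int × Int) : Bool :=
  decide (a.1 < b.1) || (!decide (b.1 < a.1) && decide (a.2 < b.2))

def heappushA (hq : List (Int × Int)) (x : Int × Int) : List (Int × Int) :=
  PySem.List.insertBy heapLt x hq

-- the body of A's 'for num in now_col_arr' loop, state = (cnt, before, hq)
def rleStep (s : Int × Int × List (Int × Int)) (num : Int) : Int × Int × List (Int × Int) :=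
  if num = 0 then s
  else if num = s.2.1 then (s.1 + 1, s.2.1, s.2.2)
  else (1, num, if s.2.1 ≠ 0 then heappushA s.2.2 (s.1, s.2.1) else s.2.2)

-- A's 'while hq' loop: pop the minimum (= head of the ordered list) and write it;
-- the source's 'if len(hq) == 0' branch is unreachable inside 'while hq' and drops out.
def drainA : List (Int × Int) → Int → List (List Int) → Int × List (List Int)
  | [], endIdx, mid => (endIdx, mid)
  | (cnt, num) :: rest, endIdx, mid =>
      drainA rest (endIdx + 2)
        ((mid.modify endIdx.toNat (· ++ [num])).modify (endIdx + 1).toNat (· ++ [cnt]))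

def c_method (array : List (List Int)) : List (List Int) :=
  let max_len := array.length * 2
  let mid0 : List (List Int) := List.replicate max_len []
  (List.foldl
    (fun (st : List (List Int) × Int) col_idx =>
      let now_col_arr : List Int :=
        List.foldl (fun acc row_idx =>
            acc ++ [PySem.List.pyGetD (PySem.List.pyGetD array row_idx []) col_idx 0]) []
          (PySem.List.pyRange 0 (array.length : Int))
      let now_col_arr := PySem.List.sorted now_col_arr (fun x => x)
      let s := List.foldl rleStep (0, PySem.List.pyGetD now_col_arr 0 0, []) now_col_arr
      let hq := heappushA s.2.2 (s.1, s.2.1)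
      let r := drainA hq 0 st.1
      (r.2, max st.2 r.1))
    (mid0, 0)
    (PySem.List.pyRange 0 ((PySem.List.pyGetD array 0 []).length : Int))).1

-- ===== PORT B =====
def c_method_alt (array : List (List Int)) : List (List Int) :=
  let mid0 : List (List Int) := List.replicate (array.length * 2) []
  List.foldl
    (fun mid j =>
      let counts : PySem.Dict Int Int :=
        List.foldl (fun d row =>
          let v := PySem.List.pyGetD row j 0
          if v ≠ 0 then d.insert v (d.getD v 0 + 1) else d) PySem.Dict.empty array
      let pairs := PySem.List.sorted2 (counts.items.map (fun p => (p.2, p.1)))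
        (fun p => p.1) (fun p => p.2)
      let pairs := if pairs = [] then [((0 : Int), (0 : Int))] else pairs
      List.foldl (fun mid ic =>
          (mid.modify (2 * ic.1).toNat (· ++ [ic.2.2])).modify (2 * ic.1 + 1).toNat (· ++ [ic.2.1]))
        mid (PySem.List.enumerate pairs))
    mid0
    (PySem.List.pyRange 0 ((PySem.List.pyGetD array 0 []).length : Int))

-- ===== PRECONDITION & SPEC =====
-- Pre_ excludes exactly the inputs on which the Python A raises IndexError:
-- the empty array (array[0]) and arrays with a row shorter than the first row.
def Pre_c_method (array : List (List Int)) : Prop :=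
  array ≠ [] ∧ ∀ row ∈ array, (array.headD []).length ≤ row.length
instance (array : List (List Int)) : Decidable (Pre_c_method array) := by
  unfold Pre_c_method; infer_instance

def pvWitness_c_method : List (List Int) := [[1, 0, 2], [2, 0, 2]]

def Spec_c_method (array : List (List Int)) (out : List (List Int)) : Prop := out = c_method_alt array
instance (array : List (List Int)) (out : List (List Int)) : Decidable (Spec_c_method array out) := by
  unfold Spec_c_method; infer_instance

-- ===== CLAIM (what is proved, stated in full; the proofs are below) =====
def Claim_equal_c_method : Prop := ∀ (array : List (List Int)), Dom_c_method array → Pre_c_method array → Spec_c_method array (c_method array)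

-- ===== LEMMAS AND PROOFS =====

-- the strict lexicographic order on the pairs, as a Prop
def lexLt (a b : Int × Int) : Prop := a.1 < b.1 ∨ (a.1 = b.1 ∧ a.2 < b.2)

-- the nonzero elements of a column
def pvNZ (l : List Int) : List Int := l.filter (fun x => decide (x ≠ 0))

-- the run pairs (count, value) of a list, head value first
def rleC : List Int → List (Int × Int)
  | [] => []
  | x :: xs => (1 + (xs.count x : Int), x) :: rleC (xs.filter (fun y => decide (y ≠ x)))
  termination_by l => l.length
  decreasing_by
    have h := List.length_filter_le (fun (y : {y // y ∈ xs}) => decide ((y : Int) ≠ x)) xs.attach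
    simp at h ⊢
    omega

-- the sequence of pairs A pushes into the heap (including the trailing push)
def pushesOf : List Int → Int → Int → List (Int × Int)
  | [], cnt, before => [(cnt, before)]
  | n :: ns, cnt, before =>
    if n = 0 then pushesOf ns cnt before
    else if n = before then pushesOf ns (cnt + 1) before
    else (if before ≠ 0 then [(cnt, before)] else []) ++ pushesOf ns 1 n

-- the column values read by both programs
def colRead (array : List (List Int)) (j : Int) : List Int :=
  array.map (fun row => PySem.List.pyGetD row j 0)

-- A's whole per-column heap
def colA (colvals : List Int) : List (Int × Int) :=
  let ys := PySem.List.sorted colvals (fun x => x)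
  let s := List.foldl rleStep (0, PySem.List.pyGetD ys 0 0, []) ys
  heappushA s.2.2 (s.1, s.2.1)

-- B's whole per-column pair list
def colB (colvals : List Int) : List (Int × Int) :=
  let pairs := PySem.List.sorted2
    ((PySem.Dict.counter (pvNZ colvals)).items.map (fun p => (p.2, p.1)))
    (fun p => p.1) (fun p => p.2)
  if pairs = [] then [((0 : Int), (0 : Int))] else pairs

lemma insertBy_nil {α : Type} (p : α → α → Bool) (x : α) :
    PySem.List.insertBy p x [] = [x] := rfl

lemma insertBy_cons {α : Type} (p : α → α → Bool) (x y : α) (ys : List α) :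
    PySem.List.insertBy p x (y :: ys) =
      if p x y then x :: y :: ys else y :: PySem.List.insertBy p x ys := rfl

lemma insertBy_perm {α : Type} (p : α → α → Bool) (x : α) (l : List α) :
    (PySem.List.insertBy p x l).Perm (x :: l) := by
  induction l with
  | nil => simp [insertBy_nil]
  | cons y ys ih =>
      rw [insertBy_cons]
      split
      · exact List.Perm.refl _
      · exact (ih.cons y).trans (List.Perm.swap _ _ _)

lemma lexLt_trans {a b c : Int × Int} (h1 : lexLt a b) (h2 : lexLt b c) : lexLt a c := by
  unfold lexLt at *; omega

lemma heapLt_true {a b : Int × Int} (h : heapLt a b = true) : lexLt a b := by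
  unfold heapLt at h; unfold lexLt; simp at h; omega

lemma heapLt_false {a b : Int × Int} (h : heapLt a b = false) (hne : a ≠ b) : lexLt b a := by
  unfold heapLt at h; unfold lexLt
  simp at h
  have : a.1 ≠ b.1 ∨ a.2 ≠ b.2 := by
    by_contra hc
    push_neg at hc
    exact hne (Prod.ext hc.1 hc.2)
  omega

lemma insertBy_pairwise (x : Int × Int) (l : List (Int × Int))
    (hl : l.Pairwise lexLt) (hx : x ∉ l) :
    (PySem.List.insertBy heapLt x l).Pairwise lexLt := by
  induction l with
  | nil => simp [insertBy_nil]
  | cons y ys ih =>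
      rw [insertBy_cons]
      rcases List.pairwise_cons.mp hl with ⟨hy, hys⟩
      split
      · rename_i hlt
        refine List.pairwise_cons.mpr ⟨?_, hl⟩
        intro z hz
        rcases List.mem_cons.mp hz with rfl | hz'
        · exact heapLt_true hlt
        · exact lexLt_trans (heapLt_true hlt) (hy z hz')
      · rename_i hnlt
        have hxy : x ≠ y := fun h => hx (h ▸ List.mem_cons_self)
        refine List.pairwise_cons.mpr ⟨?_, ih hys (fun h => hx (List.mem_cons_of_mem _ h))⟩
        intro z hz
        rcases (PySem.List.mem_insertBy _ _ _ _).mp hz with rfl | hz'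
        · exact heapLt_false (Bool.not_eq_true _ ▸ hnlt) hxy
        · exact hy z hz'

lemma foldl_push_perm : ∀ (l acc : List (Int × Int)),
    (List.foldl (fun acc x => PySem.List.insertBy heapLt x acc) acc l).Perm (acc ++ l) := by
  intro l
  induction l with
  | nil => simp
  | cons x xs ih =>
      intro acc
      rw [List.foldl_cons]
      refine (ih (PySem.List.insertBy heapLt x acc)).trans ?_
      refine ((insertBy_perm heapLt x acc).append_right xs).trans ?_
      simpa using List.perm_middle.symm

lemma foldl_push_pairwise : ∀ (l acc : List (Int × Int)),
    acc.Pairwise lexLt → (∀ x ∈ l, x ∉ acc) → l.Nodup →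
    (List.foldl (fun acc x => PySem.List.insertBy heapLt x acc) acc l).Pairwise lexLt := by
  intro l
  induction l with
  | nil => intro acc h _ _; simpa using h
  | cons x xs ih =>
      intro acc hacc hmem hnd
      rcases List.nodup_cons.mp hnd with ⟨hxxs, hndxs⟩
      refine ih _ (insertBy_pairwise x acc hacc (hmem x List.mem_cons_self)) ?_ hndxs
      intro y hy hyin
      rcases (PySem.List.mem_insertBy _ _ _ _).mp hyin with rfl | h'
      · exact hxxs hy
      · exact hmem y (List.mem_cons_of_mem _ hy) h'

lemma lex_unique {l₁ l₂ : List (Int × Int)} (hp : l₁.Perm l₂)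
    (h1 : l₁.Pairwise lexLt) (h2 : l₂.Pairwise lexLt) : l₁ = l₂ := by
  refine List.eq_of_perm_of_sorted ?_ h1 h2 hp
  intro a b _ _ hab hba
  exfalso; unfold lexLt at hab hba; omega

lemma mem_rleC_aux : ∀ (n : Nat) (l : List Int), l.length ≤ n → ∀ (c v : Int),
    ((c, v) ∈ rleC l ↔ v ∈ l ∧ c = (l.count v : Int)) := by
  intro n
  induction n with
  | zero =>
      intro l hl c v
      have h : l = [] := List.eq_nil_of_length_eq_zero (Nat.le_zero.mp hl)
      subst h; simp [rleC]
  | succ n ih =>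
      intro l hl c v
      cases l with
      | nil => simp [rleC]
      | cons x xs =>
          have hlen : (xs.filter (fun y => decide (y ≠ x))).length ≤ n := by
            have h := List.length_filter_le (fun y => decide (y ≠ x)) xs
            simp at hl
            omega
          have hx : rleC (x :: xs) =
              (1 + (xs.count x : Int), x) :: rleC (xs.filter (fun y => decide (y ≠ x))) := by
            simp [rleC]
          rw [hx, List.mem_cons, ih _ hlen]
          constructor
          · rintro (heq | ⟨hin, hc⟩)
            · have h2 : v = x := congrArg Prod.snd heq
              have h1 : c = 1 + (xs.count x : Int) := congrArg Prod.fst heq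
              subst h2
              refine ⟨List.mem_cons_self, ?_⟩
              rw [List.count_cons_self]; push_cast; omega
            · rcases List.mem_filter.mp hin with ⟨hvxs, hdec⟩
              have hvx : v ≠ x := by simpa using hdec
              refine ⟨List.mem_cons_of_mem _ hvxs, ?_⟩
              rw [hc, List.count_filter (by simp [hvx])]
              simp [List.count_cons]
              exact fun h => hvx h.symm
          · rintro ⟨hv, hc⟩
            by_cases hvx : v = x
            · subst hvx
              left
              rw [List.count_cons_self] at hc
              have h1 : c = 1 + (xs.count v : Int) := by push_cast at hc ⊢; omega
              rw [h1]
            · right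
              have hv' : v ∈ xs := by
                rcases List.mem_cons.mp hv with h | h
                · exact absurd h hvx
                · exact h
              refine ⟨List.mem_filter.mpr ⟨hv', by simp [hvx]⟩, ?_⟩
              rw [List.count_filter (by simp [hvx]), hc]
              simp [List.count_cons]
              exact fun h => hvx h.symm

lemma mem_rleC (l : List Int) (c v : Int) :
    ((c, v) ∈ rleC l ↔ v ∈ l ∧ c = (l.count v : Int)) :=
  mem_rleC_aux l.length l (le_refl _) c v

lemma nodup_rleC_aux : ∀ (n : Nat) (l : List Int), l.length ≤ n → (rleC l).Nodup := by
  intro n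
  induction n with
  | zero =>
      intro l hl
      have h : l = [] := List.eq_nil_of_length_eq_zero (Nat.le_zero.mp hl)
      subst h; simp [rleC]
  | succ n ih =>
      intro l hl
      cases l with
      | nil => simp [rleC]
      | cons x xs =>
          have hlen : (xs.filter (fun y => decide (y ≠ x))).length ≤ n := by
            have h := List.length_filter_le (fun y => decide (y ≠ x)) xs
            simp at hl
            omega
          have hx : rleC (x :: xs) =
              (1 + (xs.count x : Int), x) :: rleC (xs.filter (fun y => decide (y ≠ x))) := by
            simp [rleC]
          rw [hx]
          refine List.nodup_cons.mpr ⟨?_, ih _ hlen⟩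
          intro hmem
          rcases (mem_rleC _ _ _).mp hmem with ⟨hin, _⟩
          simp at hin

lemma nodup_rleC (l : List Int) : (rleC l).Nodup :=
  nodup_rleC_aux l.length l (le_refl _)

lemma pushesOf_G1 : ∀ (zs : List Int) (cnt before : Int),
    zs.Pairwise (· ≤ ·) → (∀ x ∈ zs, before ≤ x) → before ≠ 0 →
    pushesOf zs cnt before =
      (cnt + ((pvNZ zs).count before : Int), before) ::
        rleC ((pvNZ zs).filter (fun y => decide (y ≠ before))) := by
  intro zs
  induction zs with
  | nil => intro cnt before _ _ _; simp [pushesOf, pvNZ, rleC]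
  | cons n ns ih =>
      intro cnt before hpw hle hb0
      rcases List.pairwise_cons.mp hpw with ⟨hn, hpw'⟩
      by_cases hz : n = 0
      · subst hz
        rw [pushesOf, if_pos rfl, ih cnt before hpw' (fun x hx => hle x (List.mem_cons_of_mem _ hx)) hb0]
        simp [pvNZ]
      · by_cases hnb : n = before
        · subst hnb
          rw [pushesOf, if_neg hz, if_pos rfl,
            ih (cnt + 1) n hpw' (fun x hx => hle x (List.mem_cons_of_mem _ hx)) hb0]
          have hfz : pvNZ (n :: ns) = n :: pvNZ ns := by simp [pvNZ, hz]
          rw [hfz]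
          have hcnt : (((n :: pvNZ ns).count n : Nat) : Int) = ((pvNZ ns).count n : Int) + 1 := by
            rw [List.count_cons_self]; push_cast; ring
          have hflt : (n :: pvNZ ns).filter (fun y => decide (y ≠ n)) =
              (pvNZ ns).filter (fun y => decide (y ≠ n)) := by
            simp [List.filter_cons]
          rw [hcnt, hflt]
          congr 2
          omega
        · have hlt : before < n := lt_of_le_of_ne (hle n List.mem_cons_self) (Ne.symm hnb)
          rw [pushesOf, if_neg hz, if_neg hnb, if_pos hb0,
            ih 1 n hpw' hn hz]
          have hfz : pvNZ (n :: ns) = n :: pvNZ ns := by simp [pvNZ, hz]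
          rw [hfz]
          have hnotin : before ∉ (n :: pvNZ ns) := by
            intro hmem
            rcases List.mem_cons.mp hmem with rfl | h'
            · omega
            · rcases List.mem_filter.mp h' with ⟨h'', _⟩
              have := hn before h''
              omega
          have hcount : (n :: pvNZ ns).count before = 0 := List.count_eq_zero.mpr hnotin
          have hfilter : (n :: pvNZ ns).filter (fun y => decide (y ≠ before)) = n :: pvNZ ns := by
            apply List.filter_eq_self.mpr
            intro y hy; simp; intro h; exact hnotin (h ▸ hy)
          have hrle : rleC (n :: pvNZ ns) =
              (1 + ((pvNZ ns).count n : Int), n) :: rleC ((pvNZ ns).filter (fun y => decide (y ≠ n))) := by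
            simp [rleC]
          rw [hcount, hfilter, hrle]
          simp

lemma pushesOf_G0 : ∀ (zs : List Int),
    zs.Pairwise (· ≤ ·) → (∀ x ∈ zs, 0 ≤ x) →
    pushesOf zs 0 0 =
      if pvNZ zs = [] then [((0 : Int), (0 : Int))] else rleC (pvNZ zs) := by
  intro zs
  induction zs with
  | nil => intro _ _; simp [pushesOf, pvNZ]
  | cons n ns ih =>
      intro hpw hnn
      rcases List.pairwise_cons.mp hpw with ⟨hn, hpw'⟩
      by_cases hz : n = 0
      · subst hz
        rw [pushesOf, if_pos rfl, ih hpw' (fun x hx => hnn x (List.mem_cons_of_mem _ hx))]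
        simp [pvNZ]
      · rw [pushesOf, if_neg hz, if_neg (by intro h; exact hz h), if_neg (by simp),
          List.nil_append, pushesOf_G1 ns 1 n hpw' hn hz]
        have hfz : pvNZ (n :: ns) = n :: pvNZ ns := by simp [pvNZ, hz]
        rw [hfz, if_neg (by simp)]
        have hrle : rleC (n :: pvNZ ns) =
            (1 + ((pvNZ ns).count n : Int), n) :: rleC ((pvNZ ns).filter (fun y => decide (y ≠ n))) := by
          simp [rleC]
        rw [hrle]

lemma rle_fold : ∀ (ys : List Int) (cnt before : Int) (hq : List (Int × Int)),
    heappushA (List.foldl rleStep (cnt, before, hq) ys).2.2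
        ((List.foldl rleStep (cnt, before, hq) ys).1, (List.foldl rleStep (cnt, before, hq) ys).2.1)
      = List.foldl (fun acc x => PySem.List.insertBy heapLt x acc) hq (pushesOf ys cnt before) := by
  intro ys
  induction ys with
  | nil => intro cnt before hq; simp [pushesOf, heappushA]
  | cons n ns ih =>
      intro cnt before hq
      rw [pushesOf]
      by_cases hz : n = 0
      · subst hz
        rw [if_pos rfl]
        simpa [rleStep] using ih cnt before hq
      · by_cases hnb : n = before
        · subst hnb
          rw [if_neg hz, if_pos rfl]
          have : rleStep (cnt, n, hq) n = (cnt + 1, n, hq) := by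
            simp [rleStep, hz]
          simp only [List.foldl_cons, this]
          exact ih (cnt + 1) n hq
        · rw [if_neg hz, if_neg hnb]
          by_cases hb0 : before ≠ 0
          · rw [if_pos hb0]
            have : rleStep (cnt, before, hq) n = (1, n, heappushA hq (cnt, before)) := by
              simp [rleStep, hz, hnb, hb0]
            simp only [List.foldl_cons, this, List.foldl_append, List.foldl_cons, List.foldl_nil]
            exact ih 1 n (heappushA hq (cnt, before))
          · rw [if_neg hb0]
            have : rleStep (cnt, before, hq) n = (1, n, hq) := by
              simp [rleStep, hz, hnb] at *
              simp [hb0]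
            simp only [List.foldl_cons, this, List.nil_append]
            exact ih 1 n hq

lemma canonB_def (nzc : List Int) :
    (PySem.Dict.counter nzc).items.map (fun p => (p.2, p.1))
      = (PySem.Set.ofList nzc).map (fun v => ((nzc.count v : Int), v)) := by
  rw [PySem.Dict.items_counter, List.map_map]
  rfl

lemma sorted2_foldl (l : List (Int × Int)) :
    PySem.List.sorted2 l (fun p => p.1) (fun p => p.2) =
      List.foldl (fun acc x => PySem.List.insertBy heapLt x acc) [] l := rfl

lemma canonB_nodup (nzc : List Int) :
    ((PySem.Set.ofList nzc).map (fun v => ((nzc.count v : Int), v))).Nodup := by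
  refine List.Nodup.map ?_ (PySem.Set.nodup_ofList nzc)
  intro a b h
  exact congrArg Prod.snd h

lemma mem_canonB (nzc : List Int) (c v : Int) :
    (c, v) ∈ (PySem.Set.ofList nzc).map (fun u => ((nzc.count u : Int), u)) ↔
      v ∈ nzc ∧ c = (nzc.count v : Int) := by
  rw [List.mem_map]
  constructor
  · rintro ⟨k, hk, heq⟩
    have hv : k = v := congrArg Prod.snd heq
    subst hv
    exact ⟨(PySem.Set.mem_ofList nzc k).mp hk, (congrArg Prod.fst heq).symm⟩
  · rintro ⟨hv, rfl⟩
    exact ⟨v, (PySem.Set.mem_ofList nzc v).mpr hv, rfl⟩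

lemma colA_eq_colB (colvals : List Int) (hne : colvals ≠ []) :
    colA colvals = colB colvals := by
  obtain ⟨m, t, hys⟩ : ∃ m t, PySem.List.sorted colvals (fun x => x) = m :: t := by
    cases h : PySem.List.sorted colvals (fun x => x) with
    | nil => exact absurd ((PySem.List.sorted_eq_nil_iff _ _ _).mp h) hne
    | cons a b => exact ⟨a, b, rfl⟩
  set ys := PySem.List.sorted colvals (fun x => x) with hysdef
  have hpw : ys.Pairwise (· ≤ ·) := by
    simpa using PySem.List.sorted_pairwise colvals (fun x => x)
  have hperm : ys.Perm colvals := PySem.List.sorted_perm _ _ _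
  have hle : ∀ x ∈ ys, m ≤ x := by
    intro x hx
    simpa using PySem.List.key_head_sorted_le colvals (fun x => x) hys x (hperm.mem_iff.mp hx)
  have hm : PySem.List.pyGetD ys 0 0 = m := by
    rw [hys]; exact PySem.List.pyGetD_zero_cons m t 0
  have hA : colA colvals = List.foldl (fun acc x => PySem.List.insertBy heapLt x acc) []
      (pushesOf ys 0 m) := by
    rw [← hm]
    exact rle_fold ys 0 (PySem.List.pyGetD ys 0 0) []
  have hnzp : (pvNZ ys).Perm (pvNZ colvals) := hperm.filter _
  by_cases hc : pvNZ ys = []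
  · -- an all-zero column: A pushes the single pair (0, 0), B's counter is empty
    have hall : ∀ x ∈ ys, x = 0 := by
      intro x hx
      by_contra hx0
      have hxm : x ∈ pvNZ ys := List.mem_filter.mpr ⟨hx, by simp [hx0]⟩
      rw [hc] at hxm
      exact absurd hxm (List.not_mem_nil)
    have hm0 : m = 0 := hall m (hys ▸ List.mem_cons_self)
    have hg : pushesOf ys 0 m = [((0 : Int), (0 : Int))] := by
      rw [hm0, pushesOf_G0 ys hpw (fun x hx => le_of_eq (hall x hx).symm), if_pos hc]
    have hnzc : pvNZ colvals = [] := by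
      rw [hc] at hnzp
      exact hnzp.symm.eq_nil
    rw [hA, hg]
    unfold colB
    rw [hnzc]
    rfl
  · -- a column with nonzero values: A's run pairs are exactly B's (count, value) pairs
    have hpush : pushesOf ys 0 m = rleC (pvNZ ys) := by
      by_cases hm0 : m = 0
      · rw [hm0, pushesOf_G0 ys hpw (fun x hx => hm0 ▸ hle x hx), if_neg hc]
      · rw [pushesOf_G1 ys 0 m hpw hle hm0]
        have hnzs : pvNZ ys = m :: pvNZ t := by rw [hys]; simp [pvNZ, hm0]
        rw [hnzs]
        simp [rleC, List.count_cons_self, List.filter_cons]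
        push_cast
        omega
    have hnzc : pvNZ colvals ≠ [] := by
      intro h
      rw [h] at hnzp
      exact hc hnzp.eq_nil
    have hpermAB : (rleC (pvNZ ys)).Perm
        ((PySem.Set.ofList (pvNZ colvals)).map (fun v => (((pvNZ colvals).count v : Int), v))) := by
      rw [List.perm_ext_iff_of_nodup (nodup_rleC _) (canonB_nodup _)]
      rintro ⟨c, v⟩
      rw [mem_rleC, mem_canonB]
      constructor
      · rintro ⟨hv, rfl⟩
        exact ⟨hnzp.mem_iff.mp hv, by rw [hnzp.count_eq]⟩
      · rintro ⟨hv, rfl⟩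
        exact ⟨hnzp.mem_iff.mpr hv, by rw [hnzp.count_eq]⟩
    have hBne : PySem.List.sorted2
        ((PySem.Dict.counter (pvNZ colvals)).items.map (fun p => (p.2, p.1)))
        (fun p => p.1) (fun p => p.2) ≠ [] := by
      intro h
      have hp := PySem.List.sorted2_perm
        ((PySem.Dict.counter (pvNZ colvals)).items.map (fun p => (p.2, p.1)))
        (fun p => p.1) (fun p => p.2) false
      rw [h] at hp
      have := hp.symm.eq_nil
      rw [canonB_def] at this
      obtain ⟨x, hx⟩ := List.exists_mem_of_ne_nil _ hnzc
      have hxs : ((((pvNZ colvals).count x : Int), x)) ∈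
          (PySem.Set.ofList (pvNZ colvals)).map (fun v => (((pvNZ colvals).count v : Int), v)) :=
        List.mem_map.mpr ⟨x, (PySem.Set.mem_ofList _ x).mpr hx, rfl⟩
      rw [this] at hxs
      exact absurd hxs (List.not_mem_nil)
    have hBform : colB colvals = List.foldl (fun acc x => PySem.List.insertBy heapLt x acc) []
        ((PySem.Set.ofList (pvNZ colvals)).map (fun v => (((pvNZ colvals).count v : Int), v))) := by
      unfold colB
      rw [if_neg hBne, canonB_def, sorted2_foldl]
    rw [hA, hpush, hBform]
    apply lex_unique
    · refine ((foldl_push_perm _ []).trans ?_).trans (foldl_push_perm _ []).symm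
      simpa using hpermAB
    · exact foldl_push_pairwise _ [] List.Pairwise.nil (by simp) (nodup_rleC _)
    · exact foldl_push_pairwise _ [] List.Pairwise.nil (by simp) (canonB_nodup _)

lemma read_eq (array : List (List Int)) (j : Int) :
    List.foldl (fun acc row_idx =>
        acc ++ [PySem.List.pyGetD (PySem.List.pyGetD array row_idx []) j 0]) []
      (PySem.List.pyRange 0 (array.length : Int)) = colRead array j := by
  rw [PySem.List.foldl_pyRange_zero_pyGetD' array [] (fun acc row => acc ++ [PySem.List.pyGetD row j 0])]
  rw [PySem.List.foldl_append_singleton_eq_map]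
  simp [colRead]

lemma countsB_eq (array : List (List Int)) (j : Int) :
    List.foldl (fun (d : PySem.Dict Int Int) row =>
        let v := PySem.List.pyGetD row j 0
        if v ≠ 0 then d.insert v (d.getD v 0 + 1) else d) PySem.Dict.empty array
      = PySem.Dict.counter (pvNZ (colRead array j)) := by
  show List.foldl (fun (d : PySem.Dict Int Int) row =>
      if PySem.List.pyGetD row j 0 ≠ 0 then
        d.insert (PySem.List.pyGetD row j 0) (d.getD (PySem.List.pyGetD row j 0) 0 + 1)
      else d) PySem.Dict.empty array = _
  rw [← List.foldl_map (f := fun row => PySem.List.pyGetD row j 0)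
      (g := fun (d : PySem.Dict Int Int) v => if v ≠ 0 then d.insert v (d.getD v 0 + 1) else d)]
  rw [PySem.List.foldl_ite_eq_foldl_filter (p := fun v => v ≠ 0)
      (f := fun (d : PySem.Dict Int Int) v => d.insert v (d.getD v 0 + 1))]
  rw [PySem.Dict.foldl_insert_getD_add_one_eq_counter]
  rfl

lemma drain_enum : ∀ (l : List (Int × Int)) (i : Int) (mid : List (List Int)), 0 ≤ i →
    List.foldl (fun mid (ic : Int × Int × Int) =>
        (mid.modify (2 * ic.1).toNat (· ++ [ic.2.2])).modify (2 * ic.1 + 1).toNat (· ++ [ic.2.1]))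
      mid (PySem.List.enumerate l i)
    = (drainA l (2 * i) mid).2 := by
  intro l
  induction l with
  | nil => intro i mid _; simp [PySem.List.enumerate, drainA]
  | cons p rest ih =>
      intro i mid hi
      rcases p with ⟨c, v⟩
      rw [PySem.List.enumerate_cons, List.foldl_cons, drainA]
      have h2 : 2 * i + 2 = 2 * (i + 1) := by ring
      rw [h2]
      exact ih (i + 1) _ (by omega)

lemma foldl_fst_drain (F : Int → List (Int × Int)) :
    ∀ (l : List Int) (m : List (List Int)) (c : Int),
      (List.foldl (fun (st : List (List Int) × Int) j =>
          ((drainA (F j) 0 st.1).2, max st.2 (drainA (F j) 0 st.1).1)) (m, c) l).1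
        = List.foldl (fun mid j => (drainA (F j) 0 mid).2) m l := by
  intro l
  induction l with
  | nil => intro m c; rfl
  | cons x xs ih => intro m c; exact ih _ _

lemma drain_enum0 (l : List (Int × Int)) (mid : List (List Int)) :
    List.foldl (fun mid (ic : Int × Int × Int) =>
        (mid.modify (2 * ic.1).toNat (· ++ [ic.2.2])).modify (2 * ic.1 + 1).toNat (· ++ [ic.2.1]))
      mid (PySem.List.enumerate l 0)
    = (drainA l 0 mid).2 := by
  have h := drain_enum l 0 mid (le_refl 0)
  simpa using h

lemma A_unfold (array : List (List Int)) :
    c_method array =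
      List.foldl (fun mid j => (drainA (colA (colRead array j)) 0 mid).2)
        (List.replicate (array.length * 2) [])
        (PySem.List.pyRange 0 ((PySem.List.pyGetD array 0 []).length : Int)) := by
  simp only [c_method]
  rw [foldl_fst_drain (F := fun j =>
    heappushA
      (List.foldl rleStep
        (0, PySem.List.pyGetD (PySem.List.sorted
          (List.foldl (fun acc row_idx =>
            acc ++ [PySem.List.pyGetD (PySem.List.pyGetD array row_idx []) j 0]) []
            (PySem.List.pyRange 0 (array.length : Int))) (fun x => x)) 0 0, [])
        (PySem.List.sorted
          (List.foldl (fun acc row_idx =>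
            acc ++ [PySem.List.pyGetD (PySem.List.pyGetD array row_idx []) j 0]) []
            (PySem.List.pyRange 0 (array.length : Int))) (fun x => x))).2.2
      ((List.foldl rleStep
        (0, PySem.List.pyGetD (PySem.List.sorted
          (List.foldl (fun acc row_idx =>
            acc ++ [PySem.List.pyGetD (PySem.List.pyGetD array row_idx []) j 0]) []
            (PySem.List.pyRange 0 (array.length : Int))) (fun x => x)) 0 0, [])
        (PySem.List.sorted
          (List.foldl (fun acc row_idx =>
            acc ++ [PySem.List.pyGetD (PySem.List.pyGetD array row_idx []) j 0]) []
            (PySem.List.pyRange 0 (array.length : Int))) (fun x => x))).1,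
       (List.foldl rleStep
        (0, PySem.List.pyGetD (PySem.List.sorted
          (List.foldl (fun acc row_idx =>
            acc ++ [PySem.List.pyGetD (PySem.List.pyGetD array row_idx []) j 0]) []
            (PySem.List.pyRange 0 (array.length : Int))) (fun x => x)) 0 0, [])
        (PySem.List.sorted
          (List.foldl (fun acc row_idx =>
            acc ++ [PySem.List.pyGetD (PySem.List.pyGetD array row_idx []) j 0]) []
            (PySem.List.pyRange 0 (array.length : Int))) (fun x => x))).2.1))]
  simp only [read_eq]
  rfl

lemma B_unfold (array : List (List Int)) :
    c_method_alt array =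
      List.foldl (fun mid j => (drainA (colB (colRead array j)) 0 mid).2)
        (List.replicate (array.length * 2) [])
        (PySem.List.pyRange 0 ((PySem.List.pyGetD array 0 []).length : Int)) := by
  simp only [c_method_alt]
  simp only [countsB_eq]
  simp only [drain_enum0]
  rfl

-- ===== VERDICT (by name: the statement is the Claim_ definition above) =====
theorem c_method_spec : Claim_equal_c_method := by
  intro array _ hpre
  unfold Spec_c_method
  rw [A_unfold, B_unfold]
  have hcol : ∀ j : Int, colA (colRead array j) = colB (colRead array j) := by
    intro j
    apply colA_eq_colB
    unfold colRead
    simpa using hpre.1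
  simp only [hcol]
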